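-- pv_equiv track=rewrite | github.com/Amuenke/Stock_Price_Analysis | Stock_Projects/Archive/Biggest Mover Analysis/7_Large_Scale_Indexing.py | timelist_generator
-- ===== SOURCE A (Python) =====
-- def timelist_generator(date_list):
--     time_list = []
--     for index in range(-1, 1):
--         for i in range(9, 17):
--             if i == 9:
--                 for j in range(31,61):
--                     time_list.append(date_list[index] + ' 0' + str(i) + ':' + str(j) + ':00')
--             elif i < 16:
--                 for j in range(60):
--                     if j < 10:
--                         time_list.append(date_list[index] + ' ' + str(i) + ':0' + str(j) + ':00')
--                     else:
--                         time_list.append(date_list[index] + ' ' + str(i) + ':' + str(j) + ':00')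
--             else:
--                 time = date_list[index] + ' 16:00:00'
--                 time_list.append(time)
--     return time_list
-- ===== SOURCE B (Python) =====
-- def timelist_generator(date_list):
--     # Precompute the fixed table of time-of-day suffixes once (hour 9 keeps
--     # the original minutes 31..60, including the odd '09:60:00'), then combine
--     # each selected date with every suffix in one flat pass.
--     suffixes = []
--     for m in range(31, 61):
--         suffixes.append(f"09:{m:02d}:00")
--     for h in range(10, 16):
--         for m in range(60):
--             suffixes.append(f"{h:02d}:{m:02d}:00")
--     suffixes.append("16:00:00")
--     return [date + ' ' + s for date in (date_list[-1], date_list[0]) for s in suffixes]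
-- ===== Notes on version B (the rewrite author's own statement) =====
-- stated objective: simpler
-- what changed: Replaces the nested per-date hour/minute loops with manual zero-pad branches by a precomputed table of time-of-day suffixes (format-string padding) plus one flat date-times-suffix combination pass.
import Mathlib
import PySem

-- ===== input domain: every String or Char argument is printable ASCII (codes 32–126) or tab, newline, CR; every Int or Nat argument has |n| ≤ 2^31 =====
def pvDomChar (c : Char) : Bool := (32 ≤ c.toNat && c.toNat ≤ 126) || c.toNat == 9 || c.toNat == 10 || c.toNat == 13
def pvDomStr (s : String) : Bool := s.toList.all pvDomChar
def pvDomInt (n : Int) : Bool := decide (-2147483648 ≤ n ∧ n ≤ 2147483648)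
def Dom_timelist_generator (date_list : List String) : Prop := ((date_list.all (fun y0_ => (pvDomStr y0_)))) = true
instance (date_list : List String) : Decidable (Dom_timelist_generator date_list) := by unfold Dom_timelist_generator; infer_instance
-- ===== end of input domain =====

-- B replaces the nested per-date hour/minute loops (with manual zero-pad
-- branches) by a precomputed table of time-of-day suffixes plus one flat
-- combination pass; objective: simpler.

-- ===== PORT A =====
def timelist_generator (date_list : List String) : List String :=
  (PySem.List.pyRange (-1) 1 1).foldl (fun time_list index =>
    (PySem.List.pyRange 9 17 1).foldl (fun tl i =>
      if i == 9 then
        (PySem.List.pyRange 31 61 1).foldl (fun tl j =>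
          tl ++ [PySem.List.pyGetD date_list index "" ++ " 0" ++ PySem.Int.toStr i ++ ":" ++ PySem.Int.toStr j ++ ":00"]) tl
      else if i < 16 then
        (PySem.List.pyRange 0 60 1).foldl (fun tl j =>
          if j < 10 then
            tl ++ [PySem.List.pyGetD date_list index "" ++ " " ++ PySem.Int.toStr i ++ ":0" ++ PySem.Int.toStr j ++ ":00"]
          else
            tl ++ [PySem.List.pyGetD date_list index "" ++ " " ++ PySem.Int.toStr i ++ ":" ++ PySem.Int.toStr j ++ ":00"]) tl
      else
        tl ++ [PySem.List.pyGetD date_list index "" ++ " 16:00:00"]) time_list) []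

-- ===== PORT B =====
-- f"{n:02d}" for 0 ≤ n < 100 (exact on the values used here)
def pvPad2 (n : Int) : String :=
  if n < 10 then "0" ++ PySem.Int.toStr n else PySem.Int.toStr n

def pvSuffixes : List String :=
  let s1 := (PySem.List.pyRange 31 61 1).foldl (fun acc m => acc ++ ["09:" ++ pvPad2 m ++ ":00"]) []
  let s2 := (PySem.List.pyRange 10 16 1).foldl (fun acc h =>
    (PySem.List.pyRange 0 60 1).foldl (fun acc m => acc ++ [pvPad2 h ++ ":" ++ pvPad2 m ++ ":00"]) acc) s1
  s2 ++ ["16:00:00"]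

def timelist_generator_alt (date_list : List String) : List String :=
  [PySem.List.pyGetD date_list (-1) "", PySem.List.pyGetD date_list 0 ""].flatMap
    (fun date => pvSuffixes.map (fun s => date ++ " " ++ s))

-- ===== PRECONDITION & SPEC =====
-- A raises IndexError on the empty list (date_list[-1]); Pre_ excludes exactly that input.
def Pre_timelist_generator (date_list : List String) : Prop := date_list ≠ []
instance (date_list : List String) : Decidable (Pre_timelist_generator date_list) := by unfold Pre_timelist_generator; infer_instance
def pvWitness_timelist_generator : List String := ["2020-01-01"]

def Spec_timelist_generator (date_list : List String) (out : List String) : Prop := out = timelist_generator_alt date_list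
instance (date_list : List String) (out : List String) : Decidable (Spec_timelist_generator date_list out) := by unfold Spec_timelist_generator; infer_instance

-- ===== CLAIM (what is proved, stated in full; the proofs are below) =====
def Claim_equal_timelist_generator : Prop := ∀ (date_list : List String), Dom_timelist_generator date_list → Pre_timelist_generator date_list → Spec_timelist_generator date_list (timelist_generator date_list)

-- ===== LEMMAS AND PROOFS =====
lemma pvRangeA : PySem.List.pyRange (-1) 1 1 = [-1, 0] := by decide

set_option maxRecDepth 40000 in
set_option maxHeartbeats 4000000 in
lemma pvPerDate (d : String) (acc : List String) :
    (PySem.List.pyRange 9 17 1).foldl (fun tl i =>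
      if i == 9 then
        (PySem.List.pyRange 31 61 1).foldl (fun tl j =>
          tl ++ [d ++ " 0" ++ PySem.Int.toStr i ++ ":" ++ PySem.Int.toStr j ++ ":00"]) tl
      else if i < 16 then
        (PySem.List.pyRange 0 60 1).foldl (fun tl j =>
          if j < 10 then
            tl ++ [d ++ " " ++ PySem.Int.toStr i ++ ":0" ++ PySem.Int.toStr j ++ ":00"]
          else
            tl ++ [d ++ " " ++ PySem.Int.toStr i ++ ":" ++ PySem.Int.toStr j ++ ":00"]) tl
      else
        tl ++ [d ++ " 16:00:00"]) acc
    = acc ++ pvSuffixes.map (fun s => d ++ " " ++ s) := by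
  simp [pvSuffixes, pvPad2, List.foldl, String.append_assoc,
    show PySem.List.pyRange 9 17 1 = [9,10,11,12,13,14,15,16] from by decide,
    show PySem.List.pyRange 31 61 1 = [31,32,33,34,35,36,37,38,39,40,41,42,43,44,45,46,47,48,49,50,51,52,53,54,55,56,57,58,59,60] from by decide,
    show PySem.List.pyRange 10 16 1 = [10,11,12,13,14,15] from by decide,
    show PySem.List.pyRange 0 60 1 = [0,1,2,3,4,5,6,7,8,9,10,11,12,13,14,15,16,17,18,19,20,21,22,23,24,25,26,27,28,29,30,31,32,33,34,35,36,37,38,39,40,41,42,43,44,45,46,47,48,49,50,51,52,53,54,55,56,57,58,59] from by decide]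
  and_intros <;> decide

-- ===== VERDICT (by name: the statement is the Claim_ definition above) =====
theorem timelist_generator_spec : Claim_equal_timelist_generator := by
  intro dl _ _
  unfold Spec_timelist_generator timelist_generator timelist_generator_alt
  rw [pvRangeA]
  simp only [List.foldl, List.flatMap_cons, List.flatMap_nil, List.append_nil]
  rw [pvPerDate, pvPerDate, List.nil_append]
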